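-- pv_equiv track=rewrite | github.com/sdhers/RAINSTORM | rainstorm/seize_labels/multiplot/plot_roi_activity.py | _count_alternations_and_entries
-- ===== SOURCE A (Python) =====
-- from typing import List, Tuple
--
-- def _count_alternations_and_entries(area_sequence: List[str]) -> Tuple[int, int]:
--     """
--     Counts alternations and total entries from a sequence of visited areas.
--     An alternation is a sequence of three different, consecutive area entries (e.g., A -> B -> C).
--
--     Args:
--         area_sequence (List[str]): Ordered list of visited area names.
--
--     Returns:
--         Tuple[int, int]: A tuple containing (number of alternations, total number of area entries).
--     """
--     # Exclude 'other' from the sequence as it's not a target ROI.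
--     area_sequence = [area for area in area_sequence if area != "other"]
--
--     # Filter out consecutive duplicates to get a sequence of area *entrances*.
--     entry_sequence = [area_sequence[i] for i in range(len(area_sequence)) if i == 0 or area_sequence[i] != area_sequence[i - 1]]
--
--     total_entries = len(entry_sequence)
--     alternations = 0
--
--     # An alternation requires at least 3 entries to be possible.
--     if total_entries < 3:
--         return 0, total_entries
--
--     # Iterate through triplets of entries to find alternations (e.g., A, B, C where A!=B, B!=C, A!=C)
--     for i in range(len(entry_sequence) - 2):
--         # Check if the three consecutive entries are all unique
--         if len(set(entry_sequence[i:i+3])) == 3: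
--             alternations += 1
--
--     return alternations, total_entries
-- ===== SOURCE B (Python) =====
-- from typing import List, Tuple
--
-- def _count_alternations_and_entries(area_sequence: List[str]) -> Tuple[int, int]:
--     """One-pass count of alternations and area entries (no intermediate lists)."""
--     alternations = 0
--     total_entries = 0
--     prev2 = None
--     prev1 = None
--     for area in area_sequence:
--         if area == "other":
--             continue
--         if area != prev1:
--             total_entries += 1
--             if prev2 is not None and prev2 != area:
--                 alternations += 1
--             prev2, prev1 = prev1, area
--     return alternations, total_entries
-- ===== Notes on version B (the rewrite author's own statement) =====
-- stated objective: simpler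
-- what changed: Replaces A's three passes (filter list, consecutive-dedup list built by an index comprehension, triplet scan over set() slices) by a single pass keeping only the last two distinct kept areas, using prev2 != area as the whole alternation test; no intermediate lists are built.
import Mathlib
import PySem

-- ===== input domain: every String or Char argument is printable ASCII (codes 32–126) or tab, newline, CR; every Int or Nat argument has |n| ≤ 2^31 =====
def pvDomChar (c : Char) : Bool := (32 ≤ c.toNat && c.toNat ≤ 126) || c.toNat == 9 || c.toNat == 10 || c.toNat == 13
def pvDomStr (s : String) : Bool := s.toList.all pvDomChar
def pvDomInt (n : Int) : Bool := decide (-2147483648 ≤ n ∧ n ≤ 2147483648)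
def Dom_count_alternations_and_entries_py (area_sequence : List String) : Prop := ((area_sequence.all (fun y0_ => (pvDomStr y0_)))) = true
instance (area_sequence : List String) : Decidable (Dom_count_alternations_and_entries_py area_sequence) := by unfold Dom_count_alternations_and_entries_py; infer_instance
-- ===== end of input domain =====

-- B replaces A's three passes (filter, index-built dedup list, triplet scan over set() slices)
-- by one pass keeping only the last two distinct kept areas (objective: simpler).

-- ===== PORT A =====
def count_alternations_and_entries_py (area_sequence : List String) : Int × Int :=
  let aseq := area_sequence.filter (fun area => area ≠ "other")
  let entry_sequence := (PySem.List.pyRange 0 (PySem.List.len aseq) 1).foldl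
    (fun acc i =>
      if i = 0 ∨ PySem.List.pyGetD aseq i "" ≠ PySem.List.pyGetD aseq (i - 1) ""
      then acc ++ [PySem.List.pyGetD aseq i ""] else acc) []
  let total_entries : Int := PySem.List.len entry_sequence
  let alternations : Int := 0
  if total_entries < 3 then (0, total_entries)
  else
    ((PySem.List.pyRange 0 (PySem.List.len entry_sequence - 2) 1).foldl
      (fun alternations i =>
        if PySem.Set.len (PySem.Set.ofList (PySem.List.slice entry_sequence (some i) (some (i + 3)))) = 3
        then alternations + 1 else alternations) alternations, total_entries)

-- ===== PORT B =====
def pvAltLoop : List String → Int → Int → Option String → Option String → Int × Int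
  | [], alternations, total_entries, _, _ => (alternations, total_entries)
  | area :: rest, alternations, total_entries, prev2, prev1 =>
    if area = "other" then pvAltLoop rest alternations total_entries prev2 prev1
    else if some area ≠ prev1 then
      pvAltLoop rest
        (if prev2 ≠ none ∧ prev2 ≠ some area then alternations + 1 else alternations)
        (total_entries + 1) prev1 (some area)
    else pvAltLoop rest alternations total_entries prev2 prev1

def count_alternations_and_entries_py_alt (area_sequence : List String) : Int × Int :=
  pvAltLoop area_sequence 0 0 none none

-- ===== PRECONDITION & SPEC =====
def Spec_count_alternations_and_entries_py (area_sequence : List String) (out : Int × Int) : Prop := out = count_alternations_and_entries_py_alt area_sequence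
instance (area_sequence : List String) (out : Int × Int) : Decidable (Spec_count_alternations_and_entries_py area_sequence out) := by unfold Spec_count_alternations_and_entries_py; infer_instance

-- ===== CLAIM (what is proved, stated in full; the proofs are below) =====
def Claim_equal_count_alternations_and_entries_py : Prop := ∀ (area_sequence : List String), Dom_count_alternations_and_entries_py area_sequence → Spec_count_alternations_and_entries_py area_sequence (count_alternations_and_entries_py area_sequence)

-- ===== LEMMAS AND PROOFS =====

-- consecutive dedup ("entry sequence") of a list, given the previous kept element
def pvDedAux (p : String) : List String → List String
  | [] => []
  | a :: l => if a = p then pvDedAux p l else a :: pvDedAux a l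

def pvDed : List String → List String
  | [] => []
  | a :: l => a :: pvDedAux a l

-- number of consecutive triplets (a,b,c) with a ≠ c
def pvTrip : List String → Int
  | a :: b :: c :: t => (if a ≠ c then 1 else 0) + pvTrip (b :: c :: t)
  | _ => 0

lemma pvTrip_short (e : List String) (h : e.length < 3) : pvTrip e = 0 := by
  match e with
  | [] => rfl
  | [_] => rfl
  | [_, _] => rfl
  | _ :: _ :: _ :: _ => simp at h; omega

-- B's loop on the already-filtered list
def pvBloop : List String → Int → Int → Option String → Option String → Int × Int
  | [], alternations, total_entries, _, _ => (alternations, total_entries)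
  | area :: rest, alternations, total_entries, prev2, prev1 =>
    if some area ≠ prev1 then
      pvBloop rest
        (if prev2 ≠ none ∧ prev2 ≠ some area then alternations + 1 else alternations)
        (total_entries + 1) prev1 (some area)
    else pvBloop rest alternations total_entries prev2 prev1

lemma pvAltLoop_eq_bloop (l : List String) (a t : Int) (p2 p1 : Option String) :
    pvAltLoop l a t p2 p1 = pvBloop (l.filter (fun area => area ≠ "other")) a t p2 p1 := by
  induction l generalizing a t p2 p1 with
  | nil => rfl
  | cons x r ih =>
    by_cases hx : x = "other"
    · simp [pvAltLoop, hx, ih]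
    · have hf : List.filter (fun area => decide (area ≠ "other")) (x :: r)
          = x :: List.filter (fun area => decide (area ≠ "other")) r := by simp [hx]
      rw [hf]
      simp only [pvAltLoop, pvBloop, hx, if_false]
      split_ifs <;> exact ih _ _ _ _

lemma pvBloop_two (l : List String) (a t : Int) (p2 p1 : String) (h : p2 ≠ p1) :
    pvBloop l a t (some p2) (some p1)
      = (a + pvTrip (p2 :: p1 :: pvDedAux p1 l), t + ((pvDedAux p1 l).length : Int)) := by
  induction l generalizing a t p2 p1 with
  | nil => simp [pvBloop, pvDedAux, pvTrip]
  | cons x r ih =>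
    by_cases hx : x = p1
    · subst hx
      simp only [pvBloop, pvDedAux]
      rw [if_neg (by simp), if_pos trivial]
      exact ih _ _ _ _ h
    · have hx1 : p1 ≠ x := fun he => hx he.symm
      simp only [pvBloop, pvDedAux]
      rw [if_pos (by simp [hx]), if_neg hx,
        if_congr (by simp : (some p2 ≠ (none : Option String) ∧ some p2 ≠ some x) ↔ p2 ≠ x) rfl rfl,
        ih _ _ _ _ hx1]
      have htrip : pvTrip (p2 :: p1 :: x :: pvDedAux x r)
          = (if p2 ≠ x then 1 else 0) + pvTrip (p1 :: x :: pvDedAux x r) := rfl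
      simp only [Prod.mk.injEq]
      refine ⟨?_, by push_cast [List.length_cons]; ring⟩
      rw [htrip]
      split_ifs <;> ring

lemma pvBloop_one (l : List String) (a t : Int) (p1 : String) :
    pvBloop l a t none (some p1)
      = (a + pvTrip (p1 :: pvDedAux p1 l), t + ((pvDedAux p1 l).length : Int)) := by
  induction l generalizing a t p1 with
  | nil => simp [pvBloop, pvDedAux, pvTrip]
  | cons x r ih =>
    by_cases hx : x = p1
    · subst hx
      simp only [pvBloop, pvDedAux]
      rw [if_neg (by simp), if_pos trivial]
      exact ih _ _ _
    · have hx1 : p1 ≠ x := fun he => hx he.symm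
      simp only [pvBloop, pvDedAux]
      rw [if_pos (by simp [hx]), if_neg hx,
        if_neg (by simp), pvBloop_two _ _ _ _ _ hx1]
      simp only [Prod.mk.injEq]
      exact ⟨trivial, by push_cast [List.length_cons]; ring⟩

lemma pvBloop_zero (l : List String) :
    pvBloop l 0 0 none none = (pvTrip (pvDed l), ((pvDed l).length : Int)) := by
  cases l with
  | nil => rfl
  | cons x r =>
    simp only [pvBloop, pvDed]
    rw [if_pos (by simp), if_neg (by simp), pvBloop_one]
    simp [add_comm]

lemma pvDedAux_chain (l : List String) (p : String) :
    List.IsChain (fun x y => x ≠ y) (p :: pvDedAux p l) := by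
  induction l generalizing p with
  | nil => simp [pvDedAux]
  | cons a l ih =>
    by_cases h : a = p
    · simpa [pvDedAux, h] using ih p
    · simp only [pvDedAux, h, if_false]
      exact List.isChain_cons_cons.mpr ⟨fun he => h he.symm, ih a⟩

lemma pvDed_chain (l : List String) : List.IsChain (fun x y => x ≠ y) (pvDed l) := by
  cases l with
  | nil => simp [pvDed]
  | cons a l => exact pvDedAux_chain l a

lemma pvDedAux_idx (rest : List String) (p : String) :
    ((List.range rest.length).filter
        (fun j => decide (rest.getD j "" ≠ (if j = 0 then p else rest.getD (j - 1) "")))).map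
      (fun j => rest.getD j "")
    = pvDedAux p rest := by
  induction rest generalizing p with
  | nil => simp [pvDedAux]
  | cons b rs ih =>
    rw [List.length_cons, List.range_succ_eq_map, List.filter_cons]
    have hshift : List.filter
        (fun j => decide ((b :: rs).getD j "" ≠ (if j = 0 then p else (b :: rs).getD (j - 1) "")))
        (List.map Nat.succ (List.range rs.length))
      = List.map Nat.succ (List.filter
          (fun j => decide (rs.getD j "" ≠ (if j = 0 then b else rs.getD (j - 1) "")))
          (List.range rs.length)) := by
      rw [List.filter_map]
      congr 1
      apply List.filter_congr
      intro j _
      cases j <;> simp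
    rw [hshift]
    by_cases hb : b = p
    · rw [if_neg (by simp [hb])]
      rw [List.map_map]
      have : ((fun j => (b :: rs).getD j "") ∘ Nat.succ) = fun j => rs.getD j "" := by
        funext j; simp
      rw [this, ih b]
      subst hb
      simp [pvDedAux]
    · rw [if_pos (by simp [hb])]
      rw [List.map_cons, List.map_map]
      have : ((fun j => (b :: rs).getD j "") ∘ Nat.succ) = fun j => rs.getD j "" := by
        funext j; simp
      rw [this, ih b]
      simp [pvDedAux, hb]

lemma pvDed_idx (l : List String) :
    ((List.range l.length).filter
        (fun k => decide (k = 0 ∨ l.getD k "" ≠ l.getD (k - 1) ""))).map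
      (fun k => l.getD k "")
    = pvDed l := by
  cases l with
  | nil => simp [pvDed]
  | cons a rest =>
    rw [List.length_cons, List.range_succ_eq_map, List.filter_cons, if_pos (by simp),
      List.map_cons, List.filter_map, List.map_map]
    have hfil := List.filter_congr (l := List.range rest.length)
      (p := (fun k : Nat => decide (k = 0 ∨ (a :: rest).getD k "" ≠ (a :: rest).getD (k - 1) "")) ∘ Nat.succ)
      (q := fun j : Nat => decide (rest.getD j "" ≠ (if j = 0 then a else rest.getD (j - 1) "")))
      (fun k _ => by cases k <;> simp)
    rw [hfil]
    have hmap := List.map_congr_left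
      (l := List.filter (fun j : Nat => decide (rest.getD j "" ≠ (if j = 0 then a else rest.getD (j - 1) ""))) (List.range rest.length))
      (f := (fun k : Nat => (a :: rest).getD k "") ∘ Nat.succ)
      (g := fun j : Nat => rest.getD j "")
      (fun k _ => by simp)
    rw [hmap, pvDedAux_idx rest a]
    simp [pvDed]

lemma pvEntry_eq (l : List String) :
    (PySem.List.pyRange 0 (PySem.List.len l) 1).foldl
      (fun acc i =>
        if i = 0 ∨ PySem.List.pyGetD l i "" ≠ PySem.List.pyGetD l (i - 1) ""
        then acc ++ [PySem.List.pyGetD l i ""] else acc) []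
    = pvDed l := by
  rw [PySem.List.pyRange_one,
    PySem.List.foldl_append_ite
      (p := fun i => i = 0 ∨ PySem.List.pyGetD l i "" ≠ PySem.List.pyGetD l (i - 1) "")
      (f := fun i => PySem.List.pyGetD l i "")]
  rw [List.nil_append, List.filter_map, List.map_map]
  have hn : ((PySem.List.len l) - 0).toNat = l.length := by
    simp [PySem.List.len]
  rw [hn]
  have hfil := List.filter_congr (l := List.range l.length)
    (p := (fun x : Int => decide (x = 0 ∨ PySem.List.pyGetD l x "" ≠ PySem.List.pyGetD l (x - 1) "")) ∘ (fun k : Nat => (0 : Int) + ↑k))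
    (q := fun k : Nat => decide (k = 0 ∨ l.getD k "" ≠ l.getD (k - 1) ""))
    (fun k _ => by
      cases k with
      | zero => simp
      | succ j =>
        have h1 : (0 : Int) + ↑(j + 1) = ((j + 1 : Nat) : Int) := by push_cast; ring
        have h2 : ((j + 1 : Nat) : Int) - 1 = ((j : Nat) : Int) := by push_cast; ring
        simp only [Function.comp_apply, h1, h2, PySem.List.pyGetD_natCast]
        simp
        intro h
        exfalso
        omega)
  rw [hfil]
  have hmap := List.map_congr_left
    (l := List.filter (fun k : Nat => decide (k = 0 ∨ l.getD k "" ≠ l.getD (k - 1) "")) (List.range l.length))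
    (f := (fun i : Int => PySem.List.pyGetD l i "") ∘ (fun k : Nat => (0 : Int) + ↑k))
    (g := fun k : Nat => l.getD k "")
    (fun k _ => by simp [PySem.List.pyGetD_natCast])
  rw [hmap]
  exact pvDed_idx l

lemma pvSet3 (a b c : String) (hab : a ≠ b) (hbc : b ≠ c) :
    PySem.Set.len (PySem.Set.ofList [a, b, c]) = 3 ↔ a ≠ c := by
  have h1 : PySem.Set.ofList [a, b, c] = PySem.Set.add (PySem.Set.add [a] b) c := rfl
  have h2 : PySem.Set.add [a] b = [a, b] := PySem.Set.add_of_not_mem (by simp [Ne.symm hab])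
  rw [h1, h2]
  by_cases hac : a = c
  · subst hac
    rw [PySem.Set.add_of_mem (by simp)]
    simp [PySem.Set.len]
  · rw [PySem.Set.add_of_not_mem (by simp [Ne.symm hac, Ne.symm hbc])]
    simp [PySem.Set.len, hac]

lemma pvCount_nat (e : List String) (hch : List.IsChain (fun x y => x ≠ y) e) (acc : Int) :
    (List.range (e.length - 2)).foldl
      (fun acc k =>
        if PySem.Set.len (PySem.Set.ofList ((e.drop k).take 3)) = 3 then acc + 1 else acc) acc
    = acc + pvTrip e := by
  induction e generalizing acc with
  | nil => simp [pvTrip]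
  | cons a rest ih =>
    match rest, hch with
    | [], _ => simp [pvTrip]
    | [b], _ => simp [pvTrip]
    | b :: c :: t, hch =>
      have hab : a ≠ b := (List.isChain_cons_cons.mp hch).1
      have hch' : List.IsChain (fun x y => x ≠ y) (b :: c :: t) := (List.isChain_cons_cons.mp hch).2
      have hbc : b ≠ c := (List.isChain_cons_cons.mp hch').1
      have hlen : (a :: b :: c :: t).length - 2 = t.length + 1 := by simp
      rw [hlen, List.range_succ_eq_map, List.foldl_cons, List.foldl_map]
      have h0 : ((a :: b :: c :: t).drop 0).take 3 = [a, b, c] := by simp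
      rw [h0, if_congr (pvSet3 a b c hab hbc) rfl rfl]
      have hbody : ∀ (acc2 : Int),
          (List.range ((b :: c :: t).length - 2)).foldl
            (fun acc k =>
              if PySem.Set.len (PySem.Set.ofList (((b :: c :: t).drop k).take 3)) = 3 then acc + 1 else acc) acc2
          = (List.range t.length).foldl
            (fun acc k =>
              if PySem.Set.len (PySem.Set.ofList (((a :: b :: c :: t).drop (Nat.succ k)).take 3)) = 3 then acc + 1 else acc) acc2 := by
        intro acc2
        have h2 : (b :: c :: t).length - 2 = t.length := by simp
        rw [h2]
        rfl
      rw [← hbody, ih hch']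
      have htrip : pvTrip (a :: b :: c :: t) = (if a ≠ c then 1 else 0) + pvTrip (b :: c :: t) := rfl
      rw [htrip]
      split_ifs <;> ring

lemma pvCountA (e : List String) (hch : List.IsChain (fun x y => x ≠ y) e) (acc : Int) :
    (PySem.List.pyRange 0 (PySem.List.len e - 2) 1).foldl
      (fun acc i =>
        if PySem.Set.len (PySem.Set.ofList (PySem.List.slice e (some i) (some (i + 3)))) = 3
        then acc + 1 else acc) acc
    = acc + pvTrip e := by
  rw [PySem.List.pyRange_one]
  have hn : ((PySem.List.len e - 2) - 0).toNat = e.length - 2 := by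
    simp [PySem.List.len]
    omega
  rw [hn, List.foldl_map]
  have hb : (fun (acc : Int) (k : Nat) =>
        if PySem.Set.len (PySem.Set.ofList (PySem.List.slice e (some ((0 : Int) + ↑k)) (some (((0 : Int) + ↑k) + 3)))) = 3
        then acc + 1 else acc)
      = fun (acc : Int) (k : Nat) =>
        if PySem.Set.len (PySem.Set.ofList ((e.drop k).take 3)) = 3 then acc + 1 else acc := by
    funext acc k
    have h1 : (0 : Int) + (k : Int) = ((k : Nat) : Int) := by ring
    have h2 : ((k : Nat) : Int) + 3 = ((k : Nat) : Int) + ((3 : Nat) : Int) := by norm_num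
    rw [h1, h2, PySem.List.slice_natCast_add]
  rw [hb]
  exact pvCount_nat e hch acc

-- ===== VERDICT (by name: the statement is the Claim_ definition above) =====
theorem count_alternations_and_entries_py_spec : Claim_equal_count_alternations_and_entries_py := by
  intro l _
  unfold Spec_count_alternations_and_entries_py
  simp only [count_alternations_and_entries_py, count_alternations_and_entries_py_alt]
  rw [pvAltLoop_eq_bloop, pvBloop_zero, pvEntry_eq]
  have hlen : PySem.List.len (pvDed (List.filter (fun area => decide (area ≠ "other")) l))
      = ((pvDed (List.filter (fun area => decide (area ≠ "other")) l)).length : Int) := by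
    simp [PySem.List.len]
  by_cases h3 : PySem.List.len (pvDed (List.filter (fun area => decide (area ≠ "other")) l)) < 3
  · have h3' : (pvDed (List.filter (fun area => decide (area ≠ "other")) l)).length < 3 := by
      rw [hlen] at h3; exact_mod_cast h3
    rw [if_pos h3, pvTrip_short _ h3', hlen]
  · rw [if_neg h3, pvCountA _ (pvDed_chain _) 0, zero_add, hlen]
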